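-- pv_equiv track=rewrite | github.com/kyusung-blip/test | logic.py | get_alt_car_name
-- ===== SOURCE A (Python) =====
-- def get_alt_car_name(raw_car_name, car_name_map):
--     """
--     긴 차명(raw_car_name)에서 매핑 테이블의 키가 포함되어 있는지 확인하여
--     송금용 차명을 반환. (최장 일치 기준)
--     """
--     if not raw_car_name:
--         return ""
--
--     search_key = raw_car_name.upper()
--
--     # 키 길이가 긴 순서대로 정렬 (예: '아반떼 AD'를 '아반떼'보다 먼저 검사)
--     sorted_keys = sorted(car_name_map.keys(), key=len, reverse=True)
--
--     for map_key in sorted_keys: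
--         if map_key in search_key:
--             return car_name_map[map_key]
--
--     return raw_car_name  # 매칭되는 게 없으면 원본 반환
-- ===== SOURCE B (Python) =====
-- def get_alt_car_name(raw_car_name, car_name_map):
--     # Single pass over the dict, tracking the longest matching key (first wins
--     # on equal lengths) -- no sorting of the key list.
--     if not raw_car_name:
--         return ""
--     search_key = raw_car_name.upper()
--     best = None  # (key, value) of the longest matching key seen so far
--     for k, v in car_name_map.items():
--         if best is None:
--             if k in search_key:
--                 best = (k, v)
--         elif len(k) > len(best[0]) and k in search_key:
--             best = (k, v)
--     return best[1] if best is not None else raw_car_name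
-- ===== Notes on version B (the rewrite author's own statement) =====
-- stated objective: alternative
-- what changed: Replaces sort-all-keys-by-length-then-scan-for-first-substring-match with a single pass over the dict items that tracks the longest matching key (first key wins on equal lengths), eliminating the key sort and the separate dict lookup of the winning key.
import Mathlib
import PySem

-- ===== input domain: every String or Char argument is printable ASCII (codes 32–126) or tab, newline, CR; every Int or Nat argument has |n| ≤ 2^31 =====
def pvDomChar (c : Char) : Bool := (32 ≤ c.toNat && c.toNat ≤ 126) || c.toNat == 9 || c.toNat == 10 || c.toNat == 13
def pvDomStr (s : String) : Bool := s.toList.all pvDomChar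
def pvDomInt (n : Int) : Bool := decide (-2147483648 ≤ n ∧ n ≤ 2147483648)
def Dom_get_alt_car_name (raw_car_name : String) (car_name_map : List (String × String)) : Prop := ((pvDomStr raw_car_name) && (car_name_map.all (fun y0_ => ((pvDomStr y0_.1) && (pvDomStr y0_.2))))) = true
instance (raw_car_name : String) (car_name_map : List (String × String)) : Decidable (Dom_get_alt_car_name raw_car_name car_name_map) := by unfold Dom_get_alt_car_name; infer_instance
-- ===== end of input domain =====

-- B replaces A's sort-keys-by-length-then-scan with a single fold over the dict
-- items tracking the longest matching key (first wins on ties); same return value.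


-- ===== PORT A =====
-- the 'for map_key in sorted_keys: if map_key in search_key: return car_name_map[map_key]' loop;
-- the found key is always present in the dict, so get? never misses and the getD "" default is never used
def pvLoopA (d : PySem.Dict String String) (search_key : String) : List String → Option String
  | [] => none
  | map_key :: rest =>
      if PySem.Str.isIn map_key search_key then some ((d.get? map_key).getD "")
      else pvLoopA d search_key rest

def get_alt_car_name (raw_car_name : String) (car_name_map : List (String × String)) : String :=
  if raw_car_name = "" then ""
  else
    let search_key := PySem.Str.upper raw_car_name
    let d := PySem.Dict.ofList car_name_map
    let sorted_keys := PySem.List.sorted d.keys (fun k => PySem.Str.len k) true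
    match pvLoopA d search_key sorted_keys with
    | some v => v
    | none => raw_car_name

-- ===== PORT B =====
-- the body of B's 'for k, v in car_name_map.items():' loop
def pvStepB (search_key : String) (best : Option (String × String)) (p : String × String) :
    Option (String × String) :=
  match best with
  | none => if PySem.Str.isIn p.1 search_key then some p else none
  | some q =>
      if decide (PySem.Str.len q.1 < PySem.Str.len p.1) && PySem.Str.isIn p.1 search_key then some p
      else some q

def get_alt_car_name_alt (raw_car_name : String) (car_name_map : List (String × String)) : String :=
  if raw_car_name = "" then ""
  else
    let search_key := PySem.Str.upper raw_car_name
    let d := PySem.Dict.ofList car_name_map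
    match d.items.foldl (pvStepB search_key) none with
    | some p => p.2
    | none => raw_car_name

-- ===== PRECONDITION & SPEC =====
def Spec_get_alt_car_name (raw_car_name : String) (car_name_map : List (String × String)) (out : String) : Prop := out = get_alt_car_name_alt raw_car_name car_name_map
instance (raw_car_name : String) (car_name_map : List (String × String)) (out : String) : Decidable (Spec_get_alt_car_name raw_car_name car_name_map out) := by unfold Spec_get_alt_car_name; infer_instance

-- ===== CLAIM (what is proved, stated in full; the proofs are below) =====
def Claim_equal_get_alt_car_name : Prop := ∀ (raw_car_name : String) (car_name_map : List (String × String)), Dom_get_alt_car_name raw_car_name car_name_map → Spec_get_alt_car_name raw_car_name car_name_map (get_alt_car_name raw_car_name car_name_map)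

-- ===== LEMMAS AND PROOFS =====

-- generic form of B's loop step (pvStepB with the substring test and the length key abstracted)
def pvStepG (kf : String → Int) (Q : String × String → Bool)
    (best : Option (String × String)) (p : String × String) : Option (String × String) :=
  match best with
  | none => if Q p then some p else none
  | some q => if decide (kf q.1 < kf p.1) && Q p then some p else some q

theorem pvStepB_eq_G (search_key : String) :
    pvStepB search_key = pvStepG PySem.Str.len (fun p => PySem.Str.isIn p.1 search_key) := rfl

-- find? over one insertBy (descending, stable) insertion equals one B-step,
-- provided the list is descending in the key
theorem pv_find_insertBy (kf : String → Int) (Q : String × String → Bool)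
    (x : String × String) (S : List (String × String))
    (hS : S.Pairwise (fun a b => kf b.1 ≤ kf a.1)) :
    List.find? Q (PySem.List.insertBy (fun a b => decide (kf b.1 < kf a.1)) x S) =
    pvStepG kf Q (List.find? Q S) x := by
  induction S with
  | nil =>
      cases h : Q x <;> simp [PySem.List.insertBy, pvStepG, List.find?, h]
  | cons y ys ih =>
      have hy : ∀ z ∈ ys, kf z.1 ≤ kf y.1 := fun z hz => (List.pairwise_cons.mp hS).1 z hz
      have hys : ys.Pairwise (fun a b => kf b.1 ≤ kf a.1) := (List.pairwise_cons.mp hS).2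
      by_cases hlt : kf y.1 < kf x.1
      · -- x is inserted in front of y
        have hins : PySem.List.insertBy (fun a b => decide (kf b.1 < kf a.1)) x (y :: ys) =
            x :: y :: ys := by
          simp [PySem.List.insertBy, hlt]
        rw [hins]
        cases hx : Q x with
        | true =>
            rw [List.find?_cons_of_pos hx]
            cases hf : List.find? Q (y :: ys) with
            | none => simp [pvStepG, hx]
            | some m =>
                have hm : m ∈ y :: ys := List.mem_of_find?_eq_some hf
                have hmx : kf m.1 < kf x.1 := by
                  rcases List.mem_cons.mp hm with rfl | hm'
                  · exact hlt
                  · exact lt_of_le_of_lt (hy _ hm') hlt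
                simp [pvStepG, hx, hmx]
        | false =>
            rw [List.find?_cons_of_neg (by simp [hx])]
            cases hf : List.find? Q (y :: ys) with
            | none => simp [pvStepG, hx]
            | some m => simp [pvStepG, hx]
      · -- x goes somewhere after y
        have hins : PySem.List.insertBy (fun a b => decide (kf b.1 < kf a.1)) x (y :: ys) =
            y :: PySem.List.insertBy (fun a b => decide (kf b.1 < kf a.1)) x ys := by
          simp [PySem.List.insertBy, hlt]
        rw [hins]
        cases hqy : Q y with
        | true =>
            rw [List.find?_cons_of_pos hqy, List.find?_cons_of_pos hqy]
            simp [pvStepG, hlt]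
        | false =>
            rw [List.find?_cons_of_neg (by simp [hqy]), List.find?_cons_of_neg (by simp [hqy])]
            exact ih hys

-- find? over the descending stable sort equals B's whole fold
theorem pv_find_sorted_eq_foldl (kf : String → Int) (Q : String × String → Bool)
    (l : List (String × String)) :
    List.find? Q (PySem.List.sorted l (fun p => kf p.1) true) =
    l.foldl (pvStepG kf Q) none := by
  induction l using List.reverseRecOn with
  | nil => simp [PySem.List.sorted]
  | append_singleton l x ih =>
      rw [PySem.List.sorted_rev_eq_foldl_insertBy, List.foldl_append, List.foldl_append]
      rw [← PySem.List.sorted_rev_eq_foldl_insertBy]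
      simp only [List.foldl_cons, List.foldl_nil]
      rw [pv_find_insertBy kf Q x _ (PySem.List.sorted_pairwise_rev l _), ih]

-- stable sort commutes with mapping the key projection out
theorem pv_insertBy_map (kf : String → Int) (x : String × String)
    (S : List (String × String)) :
    PySem.List.insertBy (fun a b => decide (kf b < kf a)) x.1 (S.map Prod.fst) =
    (PySem.List.insertBy (fun a b => decide (kf b.1 < kf a.1)) x S).map Prod.fst := by
  induction S with
  | nil => simp [PySem.List.insertBy]
  | cons y ys ih =>
      by_cases h : kf y.1 < kf x.1
      · simp [PySem.List.insertBy, h]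
      · simp [PySem.List.insertBy, h, ih]

theorem pv_sorted_map (kf : String → Int) (l : List (String × String)) :
    PySem.List.sorted (l.map Prod.fst) kf true =
    (PySem.List.sorted l (fun p => kf p.1) true).map Prod.fst := by
  rw [PySem.List.sorted_rev_eq_foldl_insertBy, PySem.List.sorted_rev_eq_foldl_insertBy]
  induction l using List.reverseRecOn with
  | nil => simp
  | append_singleton l x ih =>
      simp only [List.map_append, List.map_cons, List.map_nil, List.foldl_append,
        List.foldl_cons, List.foldl_nil]
      rw [ih, pv_insertBy_map]

-- A's scan loop, described through find?
theorem pv_loopA_eq_find (d : PySem.Dict String String) (search_key : String)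
    (ks : List String) :
    pvLoopA d search_key ks =
      (List.find? (fun k => PySem.Str.isIn k search_key) ks).map
        (fun k => (d.get? k).getD "") := by
  induction ks with
  | nil => simp [pvLoopA]
  | cons k rest ih =>
      rw [pvLoopA, List.find?_cons]
      cases h : PySem.Str.isIn k search_key with
      | true => simp only [if_true, Option.map_some]
      | false => simp only [if_false, Bool.false_eq_true, ih]

-- with nodup keys, a member pair is what get? returns
theorem pv_get?_of_mem (items : List (String × String)) (p : String × String)
    (hnd : (items.map Prod.fst).Nodup) (hm : p ∈ items) :
    (List.find? (fun q => q.1 == p.1) items).map (fun q => q.2) = some p.2 := by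
  induction items with
  | nil => cases hm
  | cons y ys ih =>
      rcases List.mem_cons.mp hm with rfl | hm'
      · simp [List.find?]
      · rw [List.map_cons, List.nodup_cons] at hnd
        have hne : ¬ (y.1 == p.1) = true := by
          intro h
          apply hnd.1
          have : y.1 = p.1 := by simpa using h
          rw [this]
          exact List.mem_map.mpr ⟨p, hm', rfl⟩
        rw [List.find?_cons_of_neg (by simpa using hne)]
        exact ih hnd.2 hm'

-- a some-result of B's fold is the start value or one of the items
theorem pv_foldl_stepG_mem (kf : String → Int) (Q : String × String → Bool)
    (l : List (String × String)) (b : Option (String × String)) (p : String × String)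
    (h : l.foldl (pvStepG kf Q) b = some p) :
    (b = some p) ∨ p ∈ l := by
  induction l generalizing b with
  | nil => exact Or.inl h
  | cons x xs ih =>
      rcases ih (pvStepG kf Q b x) h with h' | h'
      · unfold pvStepG at h'
        cases b with
        | none =>
            by_cases hx : Q x = true
            · simp [hx] at h'; exact Or.inr (by simp [h'])
            · simp [hx] at h'
        | some q =>
            by_cases hc : (decide (kf q.1 < kf x.1) && Q x) = true
            · simp [hc] at h'; exact Or.inr (by simp [h'])
            · simp [hc] at h'; exact Or.inl (by simp [h'])
      · exact Or.inr (List.mem_cons_of_mem _ h')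

-- ===== VERDICT (by name: the statement is the Claim_ definition above) =====
theorem get_alt_car_name_spec : Claim_equal_get_alt_car_name := by
  intro raw_car_name car_name_map _
  unfold Spec_get_alt_car_name get_alt_car_name get_alt_car_name_alt
  by_cases hraw : raw_car_name = ""
  · simp [hraw]
  · simp only [hraw, if_false]
    set search_key := PySem.Str.upper raw_car_name with hsk
    set d := PySem.Dict.ofList car_name_map with hd
    have hkeys : d.keys = d.items.map Prod.fst := rfl
    rw [pv_loopA_eq_find, hkeys, pv_sorted_map, List.find?_map]
    have : (List.find? ((fun k => PySem.Str.isIn k search_key) ∘ Prod.fst)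
        (PySem.List.sorted d.items (fun p => PySem.Str.len p.1) true)) =
        (List.find? (fun p => PySem.Str.isIn p.1 search_key)
        (PySem.List.sorted d.items (fun p => PySem.Str.len p.1) true)) := rfl
    rw [this, pv_find_sorted_eq_foldl PySem.Str.len
      (fun p => PySem.Str.isIn p.1 search_key), ← pvStepB_eq_G]
    cases hf : d.items.foldl (pvStepB search_key) none with
    | none => simp
    | some p =>
        have hmem : p ∈ d.items := by
          rcases pv_foldl_stepG_mem PySem.Str.len (fun p => PySem.Str.isIn p.1 search_key)
            d.items none p (by rw [← pvStepB_eq_G]; exact hf) with h | h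
          · cases h
          · exact h
        have hget : d.get? p.1 = some p.2 := by
          show (List.find? (fun q => q.1 == p.1) d.items).map (fun q => q.2) = some p.2
          exact pv_get?_of_mem d.items p (PySem.Dict.nodup_keys_ofList car_name_map) hmem
        simp [hget]
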